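-- pv_equiv track=rewrite | github.com/Aruk2004/GFG_POTD | Nov_2023/Nov_10.py | printMinNumberForPattern
-- ===== SOURCE A (Python) =====
-- def printMinNumberForPattern(S):
--     col = []
--     curr = S[0]
--     c = 1 if S[0] == 'I' else 0
--
--     for i in S:
--         if i == curr:
--             c += 1
--         else:
--             col.append((curr, c))
--             c = 1
--             curr = i
--
--     if S[-1] == 'I':
--         c += 1
--     col.append((curr, c))
--
--     out = ""
--     c = 1
--
--     for op, cnt in col:
--         temp = ""
--         for _ in range(cnt + (1 if op == 'D' else -1)):
--             temp += str(c)
--             c += 1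
--         if op == 'D':
--             temp = temp[::-1]
--         out += temp
--
--     return out
-- ===== SOURCE B (Python) =====
-- def printMinNumberForPattern(S):
--     # One pass, no run list: keep the next number c, the count of not-yet-emitted
--     # numbers of the current 'D' stretch, and the previous character.  A 'D' only
--     # defers; any other character first flushes a pending 'D' stretch (reversed),
--     # otherwise it emits its own number only when it continues a run (or is a
--     # leading 'I'); a trailing 'D' stretch or trailing 'I' emits one number more.
--     out = []
--     c = 1
--     pend = 0
--     prev = None
--     for ch in S:
--         if ch == 'D':
--             pend += 1
--         elif prev == 'D':
--             out.append(''.join(map(str, range(c, c + pend + 1)))[::-1])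
--             c += pend + 1
--             pend = 0
--         elif ch == prev or (prev is None and ch == 'I'):
--             out.append(str(c))
--             c += 1
--         prev = ch
--     if prev == 'D':
--         out.append(''.join(map(str, range(c, c + pend + 1)))[::-1])
--     elif prev == 'I':
--         out.append(str(c))
--     return ''.join(out)
-- ===== Notes on version B (the rewrite author's own statement) =====
-- stated objective: alternative
-- what changed: Replaces A's two-phase run-length grouping (build a (char,count) run list with first/last adjustments, then a second loop emitting digits per run) with a single-pass state machine that keeps only the previous character, a pending-'D' count and the next number, emitting directly as it scans.
import Mathlib
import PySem

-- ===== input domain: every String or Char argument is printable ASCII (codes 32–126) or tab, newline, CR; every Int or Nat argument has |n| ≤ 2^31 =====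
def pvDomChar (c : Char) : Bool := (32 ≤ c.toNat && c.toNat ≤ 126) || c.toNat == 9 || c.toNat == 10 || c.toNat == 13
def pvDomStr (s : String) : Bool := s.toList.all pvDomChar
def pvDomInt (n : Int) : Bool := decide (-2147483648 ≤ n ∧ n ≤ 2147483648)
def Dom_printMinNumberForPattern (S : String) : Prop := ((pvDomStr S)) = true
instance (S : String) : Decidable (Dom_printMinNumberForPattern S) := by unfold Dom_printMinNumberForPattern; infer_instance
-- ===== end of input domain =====

set_option maxRecDepth 8192

-- B replaces A's two-phase run-length grouping (build a (char,count) run list, then emit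
-- per run) with a single-pass state machine over the characters (previous character,
-- pending-'D' count, next number); equivalence is proved on all nonempty strings.


-- ===== PORT A =====
-- state: (col, curr, c); one step of A's first for-loop
def pvAStep (st : List (Char × Int) × Char × Int) (i : Char) : List (Char × Int) × Char × Int :=
  if i = st.2.1 then (st.1, st.2.1, st.2.2 + 1) else (st.1 ++ [(st.2.1, st.2.2)], i, 1)

-- state: (out, c); one step of A's second for-loop (op, cnt) — temp built by the inner
-- range loop, then temp[::-1] if op == 'D' (string reverse, ported via PySem.List.slice?)
def pvAEmitRun (st : List Char × Int) (p : Char × Int) : List Char × Int :=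
  let t := (PySem.List.pyRange 0 (p.2 + (if p.1 = 'D' then 1 else -1)) 1).foldl
      (fun (q : List Char × Int) _ => (q.1 ++ PySem.Int.toChars q.2, q.2 + 1)) ([], st.2)
  let temp := if p.1 = 'D' then (PySem.List.slice? t.1 none none (-1)).getD [] else t.1
  (st.1 ++ temp, t.2)

def printMinNumberForPattern (S : String) : String :=
  match S.toList with
  | [] => ""  -- Python raises IndexError at S[0] here; excluded by Pre_
  | a :: _ =>
    let st := S.toList.foldl pvAStep ([], a, if a = 'I' then (1 : Int) else 0)
    let c2 := if PySem.List.pyGet? S.toList (-1) = some 'I' then st.2.2 + 1 else st.2.2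
    String.ofList ((st.1 ++ [(st.2.1, c2)]).foldl pvAEmitRun ([], 1)).1

-- ===== PORT B =====
-- ''.join(map(str, range(a, b)))
def pvSeg (a b : Int) : List Char :=
  PySem.Chars.join [] ((PySem.List.pyRange a b 1).map PySem.Int.toChars)

-- state: (out, c, pend, prev); one step of B's for-loop over the characters
def pvBStep (st : List (List Char) × Int × Int × Option Char) (ch : Char) :
    List (List Char) × Int × Int × Option Char :=
  if ch = 'D' then (st.1, st.2.1, st.2.2.1 + 1, some ch)
  else if st.2.2.2 = some 'D' then
    (st.1 ++ [(PySem.List.slice? (pvSeg st.2.1 (st.2.1 + st.2.2.1 + 1)) none none (-1)).getD []],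
     st.2.1 + st.2.2.1 + 1, 0, some ch)
  else if some ch = st.2.2.2 ∨ (st.2.2.2 = none ∧ ch = 'I') then
    (st.1 ++ [PySem.Int.toChars st.2.1], st.2.1 + 1, st.2.2.1, some ch)
  else (st.1, st.2.1, st.2.2.1, some ch)

def printMinNumberForPattern_alt (S : String) : String :=
  let st := S.toList.foldl pvBStep ([], 1, 0, none)
  String.ofList (PySem.Chars.join []
    (if st.2.2.2 = some 'D' then
      st.1 ++ [(PySem.List.slice? (pvSeg st.2.1 (st.2.1 + st.2.2.1 + 1)) none none (-1)).getD []]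
     else if st.2.2.2 = some 'I' then st.1 ++ [PySem.Int.toChars st.2.1]
     else st.1))

-- ===== PRECONDITION & SPEC =====
-- Pre_ excludes exactly the empty string, on which the Python A raises IndexError at S[0].
def Pre_printMinNumberForPattern (S : String) : Prop :=
  S.toList.isEmpty = false
instance (S : String) : Decidable (Pre_printMinNumberForPattern S) := by
  unfold Pre_printMinNumberForPattern; infer_instance

def pvWitness_printMinNumberForPattern : String := "ID"

def Spec_printMinNumberForPattern (S : String) (out : String) : Prop := out = printMinNumberForPattern_alt S
instance (S : String) (out : String) : Decidable (Spec_printMinNumberForPattern S out) := by unfold Spec_printMinNumberForPattern; infer_instance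

-- ===== CLAIM (what is proved, stated in full; the proofs are below) =====
def Claim_equal_printMinNumberForPattern : Prop := ∀ (S : String), Dom_printMinNumberForPattern S → Pre_printMinNumberForPattern S → Spec_printMinNumberForPattern S (printMinNumberForPattern S)

-- ===== LEMMAS AND PROOFS =====

-- the digit characters of str(e), str(e+1), …, str(e+m-1) concatenated
def pvFwd : Int → Nat → List Char
  | _, 0 => []
  | e, m + 1 => PySem.Int.toChars e ++ pvFwd (e + 1) m

-- the characters A emits for one run (op, cnt) starting at counter e
def pvRun (e : Int) (op : Char) (cnt : Int) : List Char :=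
  if op = 'D' then (pvFwd e (cnt + 1).toNat).reverse else pvFwd e (cnt - 1).toNat

-- A's remaining output while mid-run (curr seen c times), emit counter e, rest s
def pvF : Int → Char → Int → List Char → List Char
  | e, curr, c, [] => pvRun e curr (if curr = 'I' then c + 1 else c)
  | e, curr, c, i :: t =>
    if i = curr then pvF e curr (c + 1) t
    else pvRun e curr c ++
      pvF (e + ((c + (if curr = 'D' then 1 else -1)).toNat : Int)) i 1 t

-- B's segment for numbers start..b-1, reversed when it has more than one number
def pvPiece (a b : Int) : List Char :=
  if b - 1 > a then (pvFwd a (b - a).toNat).reverse else pvFwd a (b - a).toNat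

-- B's remaining output: next index i, pending segment start, rest s
def pvG : Int → Int → List Char → List Char
  | i, start, [] => pvPiece start (i + 2)
  | i, start, ch :: t =>
    if ch ≠ 'D' then pvPiece start (i + 2) ++ pvG (i + 1) (i + 2) t
    else pvG (i + 1) start t

-- A's run-building loop, as a structural recursion (result relative to an empty col)
def pvP : List Char → Char → Int → List (Char × Int) × Char × Int
  | [], curr, c => ([], curr, c)
  | i :: t, curr, c =>
    if i = curr then pvP t curr (c + 1)
    else let r := pvP t i 1; ((curr, c) :: r.1, r.2)

-- A's emit loop, as a structural recursion
def pvEmit : Int → List (Char × Int) → List Char × Int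
  | e, [] => ([], e)
  | e, (op, cnt) :: r =>
    let p := pvEmit (e + ((cnt + (if op = 'D' then 1 else -1)).toNat : Int)) r
    (pvRun e op cnt ++ p.1, p.2)

theorem pvFwd_snoc (n : Nat) : ∀ e : Int, pvFwd e (n + 1) = pvFwd e n ++ PySem.Int.toChars (e + n) := by
  induction n with
  | zero => intro e; simp [pvFwd]
  | succ m ih =>
      intro e
      show PySem.Int.toChars e ++ pvFwd (e + 1) (m + 1) = pvFwd e (m + 1) ++ _
      rw [ih (e + 1)]
      simp [pvFwd, List.append_assoc]
      ring_nf

theorem pvAStep_foldl (s : List Char) : ∀ (col : List (Char × Int)) (curr : Char) (c : Int),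
    s.foldl pvAStep (col, curr, c) = (col ++ (pvP s curr c).1, (pvP s curr c).2) := by
  induction s with
  | nil => intro col curr c; simp [pvP]
  | cons i t ih =>
      intro col curr c
      by_cases h : i = curr
      · simp [List.foldl_cons, pvAStep, pvP, h, ih]
      · simp [List.foldl_cons, pvAStep, pvP, h, ih, List.append_assoc]

theorem pvP_curr (s : List Char) : ∀ (curr : Char) (c : Int), (pvP s curr c).2.1 = s.getLastD curr := by
  induction s with
  | nil => intro curr c; simp [pvP]
  | cons i t ih =>
      intro curr c
      rw [List.getLastD_cons]
      by_cases h : i = curr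
      · subst h; simp only [pvP, if_pos rfl]; exact ih i (c + 1)
      · simp only [pvP, if_neg h]; exact ih i 1

-- the inner 'for _ in range(...)' loop of A appends the next l.length counter strings
theorem pvInner_foldl (l : List Int) : ∀ (t0 : List Char) (c : Int),
    l.foldl (fun (q : List Char × Int) _ => (q.1 ++ PySem.Int.toChars q.2, q.2 + 1)) (t0, c)
      = (t0 ++ pvFwd c l.length, c + l.length) := by
  induction l with
  | nil => intro t0 c; simp [pvFwd]
  | cons x r ih =>
      intro t0 c
      rw [List.foldl_cons, ih]
      simp [pvFwd, List.append_assoc]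
      omega

theorem pvAEmitRun_eq (st : List Char × Int) (p : Char × Int) :
    pvAEmitRun st p
      = (st.1 ++ pvRun st.2 p.1 p.2, st.2 + ((p.2 + (if p.1 = 'D' then 1 else -1)).toNat : Int)) := by
  obtain ⟨out, e⟩ := st
  obtain ⟨op, cnt⟩ := p
  simp only [pvAEmitRun, pvInner_foldl, PySem.List.length_pyRange_one]
  by_cases h : op = 'D'
  · subst h
    simp only [pvRun, reduceIte, PySem.List.slice?_none_none_neg_one, Option.getD_some,
      List.nil_append, sub_zero]
  · simp only [pvRun, if_neg h, List.nil_append, sub_zero]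
    rw [show cnt + -1 = cnt - 1 by ring]

theorem pvEmit_foldl (col : List (Char × Int)) : ∀ (out : List Char) (e : Int),
    col.foldl pvAEmitRun (out, e) = (out ++ (pvEmit e col).1, (pvEmit e col).2) := by
  induction col with
  | nil => intro out e; simp [pvEmit]
  | cons p r ih =>
      intro out e
      obtain ⟨op, cnt⟩ := p
      rw [List.foldl_cons, pvAEmitRun_eq, ih]
      simp [pvEmit, List.append_assoc]

theorem pvEmit_toCol (s : List Char) : ∀ (curr : Char) (c e : Int),
    (pvEmit e ((pvP s curr c).1 ++
        [((pvP s curr c).2.1,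
          if (pvP s curr c).2.1 = 'I' then (pvP s curr c).2.2 + 1 else (pvP s curr c).2.2)])).1
      = pvF e curr c s := by
  induction s with
  | nil => intro curr c e; simp [pvP, pvEmit, pvF]
  | cons i t ih =>
      intro curr c e
      by_cases h : i = curr
      · simp only [pvP, pvF, h, if_pos rfl, if_true]
        exact ih curr (c + 1) e
      · simp only [pvP, pvF, if_neg h]
        simp only [List.cons_append, pvEmit, ih]

-- A's port equals pvF on a nonempty character list
theorem pvA_eq_F (S : String) (a : Char) (t : List Char) (h : S.toList = a :: t) :
    printMinNumberForPattern S
      = String.ofList (pvF 1 a ((if a = 'I' then (1 : Int) else 0) + 1) t) := by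
  unfold printMinNumberForPattern
  rw [h]
  simp only [pvAStep_foldl, List.nil_append]
  have hstep : pvP (a :: t) a (if a = 'I' then (1 : Int) else 0)
      = pvP t a ((if a = 'I' then (1 : Int) else 0) + 1) := by
    simp [pvP]
  have hlast : PySem.List.pyGet? (a :: t) (-1) = some (t.getLastD a) := by
    rw [PySem.List.pyGet?_neg_one]
    cases t using List.reverseRecOn with
    | nil => simp
    | append_singleton t' x =>
        rw [← List.cons_append, List.getLast?_concat, List.getLastD_concat]
  rw [hstep, hlast]
  rw [pvP_curr t a _, pvEmit_foldl]
  simp only [List.nil_append, Option.some.injEq]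
  congr 1
  have := pvEmit_toCol t a ((if a = 'I' then (1 : Int) else 0) + 1) 1
  rw [pvP_curr t a _] at this
  exact this

theorem pvJoin_cons (x : List Char) (r : List (List Char)) :
    PySem.Chars.join [] (x :: r) = x ++ PySem.Chars.join [] r := by
  cases r with
  | nil => simp [PySem.Chars.join_singleton, PySem.Chars.join_nil]
  | cons y ys => rw [PySem.Chars.join_cons_cons]; simp

theorem pvSeg_eq_fwd_nat (n : Nat) : ∀ a : Int, pvSeg a (a + n) = pvFwd a n := by
  induction n with
  | zero => intro a; simp [pvSeg, pvFwd, PySem.List.pyRange_one_eq_nil, PySem.Chars.join_nil]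
  | succ m ih =>
      intro a
      unfold pvSeg
      rw [PySem.List.pyRange_one_cons (by push_cast; omega)]
      rw [show a + ((m + 1 : Nat) : Int) = (a + 1) + (m : Nat) by push_cast; ring]
      simp only [List.map_cons]
      rw [pvJoin_cons]
      have ihh := ih (a + 1)
      unfold pvSeg at ihh
      rw [ihh]
      simp [pvFwd]

theorem pvSeg_eq_fwd (a b : Int) : pvSeg a b = pvFwd a (b - a).toNat := by
  by_cases h : a ≤ b
  · calc pvSeg a b = pvSeg a (a + ((b - a).toNat : Nat)) := by
          rw [show a + (((b - a).toNat : Nat) : Int) = b by omega]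
      _ = pvFwd a (b - a).toNat := pvSeg_eq_fwd_nat _ a
  · have h1 : (b - a).toNat = 0 := by omega
    have h2 : PySem.List.pyRange a b 1 = [] := PySem.List.pyRange_one_eq_nil (by omega)
    simp [pvSeg, h1, h2, pvFwd, PySem.Chars.join_nil]

-- B's fold, as a structural recursion (pieces relative to an empty out)
def pvHp : Int → Int → Option Char → List Char → List (List Char) × Int × Int × Option Char
  | c, pend, prev, [] => ([], c, pend, prev)
  | c, pend, prev, ch :: t =>
    if ch = 'D' then pvHp c (pend + 1) (some ch) t
    else if prev = some 'D' then
      let r := pvHp (c + pend + 1) 0 (some ch) t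
      ((pvSeg c (c + pend + 1)).reverse :: r.1, r.2)
    else if some ch = prev ∨ (prev = none ∧ ch = 'I') then
      let r := pvHp (c + 1) pend (some ch) t
      (PySem.Int.toChars c :: r.1, r.2)
    else pvHp c pend (some ch) t

-- B's remaining output (loop remainder plus the trailing emission), joined
def pvH : Int → Int → Option Char → List Char → List Char
  | c, pend, prev, [] =>
      if prev = some 'D' then (pvFwd c (pend + 1).toNat).reverse
      else if prev = some 'I' then PySem.Int.toChars c
      else []
  | c, pend, prev, ch :: t =>
      if ch = 'D' then pvH c (pend + 1) (some ch) t
      else if prev = some 'D' then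
        (pvFwd c (pend + 1).toNat).reverse ++ pvH (c + pend + 1) 0 (some ch) t
      else if some ch = prev ∨ (prev = none ∧ ch = 'I') then
        PySem.Int.toChars c ++ pvH (c + 1) pend (some ch) t
      else pvH c pend (some ch) t

theorem pvBStep_foldl (s : List Char) : ∀ (c pend : Int) (prev : Option Char) (out0 : List (List Char)),
    s.foldl pvBStep (out0, c, pend, prev)
      = (out0 ++ (pvHp c pend prev s).1, (pvHp c pend prev s).2) := by
  induction s with
  | nil => intro c pend prev out0; simp [pvHp]
  | cons ch t ih =>
      intro c pend prev out0
      rw [List.foldl_cons]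
      by_cases h1 : ch = 'D'
      · simp only [pvBStep, pvHp, if_pos h1]
        exact ih _ _ _ _
      · by_cases h2 : prev = some 'D'
        · simp only [pvBStep, pvHp, if_neg h1, if_pos h2, PySem.List.slice?_none_none_neg_one,
            Option.getD_some]
          rw [ih]
          simp [List.append_assoc]
        · by_cases h3 : some ch = prev ∨ (prev = none ∧ ch = 'I')
          · simp only [pvBStep, pvHp, if_neg h1, if_neg h2, if_pos h3]
            rw [ih]
            simp [List.append_assoc]
          · simp only [pvBStep, pvHp, if_neg h1, if_neg h2, if_neg h3]
            exact ih _ _ _ _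

theorem pvH_key (s : List Char) : ∀ (c pend : Int) (prev : Option Char),
    PySem.Chars.join [] ((pvHp c pend prev s).1 ++
      (if (pvHp c pend prev s).2.2.2 = some 'D' then
        [(pvSeg (pvHp c pend prev s).2.1
            ((pvHp c pend prev s).2.1 + (pvHp c pend prev s).2.2.1 + 1)).reverse]
       else if (pvHp c pend prev s).2.2.2 = some 'I' then
        [PySem.Int.toChars (pvHp c pend prev s).2.1]
       else []))
      = pvH c pend prev s := by
  induction s with
  | nil =>
      intro c pend prev
      simp only [pvHp, pvH, List.nil_append]
      by_cases h1 : prev = some 'D'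
      · rw [if_pos h1, if_pos h1, PySem.Chars.join_singleton, pvSeg_eq_fwd]
        rw [show c + pend + 1 - c = pend + 1 by ring]
      · rw [if_neg h1, if_neg h1]
        by_cases h2 : prev = some 'I'
        · rw [if_pos h2, if_pos h2, PySem.Chars.join_singleton]
        · rw [if_neg h2, if_neg h2, PySem.Chars.join_nil]
  | cons ch t ih =>
      intro c pend prev
      by_cases h1 : ch = 'D'
      · simp only [pvHp, pvH, if_pos h1]
        exact ih _ _ _
      · by_cases h2 : prev = some 'D'
        · simp only [pvHp, pvH, if_neg h1, if_pos h2, List.cons_append]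
          rw [pvJoin_cons, ih, pvSeg_eq_fwd]
          rw [show c + pend + 1 - c = pend + 1 by ring]
        · by_cases h3 : some ch = prev ∨ (prev = none ∧ ch = 'I')
          · simp only [pvHp, pvH, if_neg h1, if_neg h2, if_pos h3, List.cons_append]
            rw [pvJoin_cons, ih]
          · simp only [pvHp, pvH, if_neg h1, if_neg h2, if_neg h3]
            exact ih _ _ _

theorem pvB_eq_H (S : String) :
    printMinNumberForPattern_alt S = String.ofList (pvH 1 0 none S.toList) := by
  unfold printMinNumberForPattern_alt
  rw [pvBStep_foldl S.toList 1 0 none []]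
  simp only [List.nil_append, PySem.List.slice?_none_none_neg_one, Option.getD_some]
  congr 1
  rw [← pvH_key S.toList 1 0 none]
  by_cases h1 : (pvHp 1 0 none S.toList).2.2.2 = some 'D'
  · rw [if_pos h1, if_pos h1]
  · rw [if_neg h1, if_neg h1]
    by_cases h2 : (pvHp 1 0 none S.toList).2.2.2 = some 'I'
    · rw [if_pos h2, if_pos h2]
    · rw [if_neg h2, if_neg h2, List.append_nil]

theorem pvFwd_one (a : Int) : pvFwd a 1 = PySem.Int.toChars a := by
  simp [pvFwd]

-- the heart: A's per-run emission equals B's per-character emission, by one induction on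
-- the remaining characters, simultaneously for a pending non-'D' run and a pending 'D' run
theorem pvMain (s : List Char) :
    (∀ (e cA : Int) (x : Char), x ≠ 'D' → 1 ≤ cA →
        pvF e x cA s = pvFwd e (cA - 1).toNat ++ pvH (e + cA - 1) 0 (some x) s) ∧
    (∀ e k : Int, 1 ≤ k → pvF e 'D' k s = pvH e k (some 'D') s) := by
  induction s with
  | nil =>
      constructor
      · intro e cA x hx hc
        simp only [pvF, pvRun, if_neg hx, pvH]
        rw [if_neg (show ¬ ((some x : Option Char) = some 'D') by simpa using hx)]
        by_cases hI : x = 'I'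
        · subst hI
          simp only [reduceIte]
          rw [show (cA + 1 - 1).toNat = (cA - 1).toNat + 1 by omega, pvFwd_snoc]
          rw [show e + (((cA - 1).toNat : Nat) : Int) = e + cA - 1 by omega]
        · rw [if_neg hI, if_neg (show ¬ ((some x : Option Char) = some 'I') by simpa using hI),
            List.append_nil]
      · intro e k hk
        simp only [pvF, pvRun, pvH, reduceIte]
        rfl
  | cons i t ih =>
      obtain ⟨ihI, ihD⟩ := ih
      constructor
      · intro e cA x hx hc
        by_cases hD : i = 'D'
        · subst hD
          simp only [pvF, pvRun, pvH, if_pos rfl, if_neg hx]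
          rw [if_neg (show ¬ (('D' : Char) = x) from fun h => hx h.symm)]
          rw [show e + (((cA + -1).toNat : Nat) : Int) = e + cA - 1 by omega]
          rw [ihD (e + cA - 1) 1 (by omega)]
          norm_num
        · by_cases hEq : i = x
          · subst hEq
            simp only [pvF, pvH, if_neg hD, reduceIte, eq_self_iff_true, if_true]
            rw [if_neg (show ¬ ((some i : Option Char) = some 'D') by simpa using hD)]
            simp only [true_or, if_true]
            rw [ihI e (cA + 1) i hD (by omega)]
            rw [show (cA + 1 - 1).toNat = (cA - 1).toNat + 1 by omega, pvFwd_snoc]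
            rw [show e + (((cA - 1).toNat : Nat) : Int) = e + cA - 1 by omega]
            rw [show e + (cA + 1) - 1 = e + cA - 1 + 1 by ring, List.append_assoc]
          · simp only [pvF, pvRun, pvH, if_neg hEq, if_neg hx, if_neg hD]
            rw [if_neg (show ¬ ((some x : Option Char) = some 'D') by simpa using hx)]
            rw [if_neg (show ¬ ((some i : Option Char) = some x ∨
                ((some x : Option Char) = none ∧ i = 'I')) by simp [hEq])]
            rw [show e + (((cA + -1).toNat : Nat) : Int) = e + cA - 1 by omega]
            rw [ihI (e + cA - 1) 1 i hD (by omega)]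
            rw [show ((1 : Int) - 1).toNat = 0 by decide]
            simp only [pvFwd, List.nil_append]
            rw [show e + cA - 1 + 1 - 1 = e + cA - 1 by ring]
      · intro e k hk
        by_cases hD : i = 'D'
        · subst hD
          simp only [pvF, pvH, if_pos rfl]
          exact ihD e (k + 1) (by omega)
        · simp only [pvF, pvRun, pvH, if_neg hD, reduceIte]
          rw [show e + (((k + 1).toNat : Nat) : Int) = e + k + 1 by omega]
          rw [ihI (e + k + 1) 1 i hD (by omega)]
          rw [show ((1 : Int) - 1).toNat = 0 by decide]
          simp only [pvFwd, List.nil_append]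
          rw [show e + k + 1 + 1 - 1 = e + k + 1 by ring]

-- ===== VERDICT (by name: the statement is the Claim_ definition above) =====
theorem printMinNumberForPattern_spec : Claim_equal_printMinNumberForPattern := by
  intro S _ hpre
  have hpre' : S.toList.isEmpty = false := hpre
  have hne : S.toList ≠ [] := by simpa using hpre'
  unfold Spec_printMinNumberForPattern
  cases h : S.toList with
  | nil => exact absurd h hne
  | cons a t =>
      rw [pvA_eq_F S a t h, pvB_eq_H S, h]
      congr 1
      by_cases haD : a = 'D'
      · subst haD
        simp only [if_neg (show ¬ (('D' : Char) = 'I') by decide), pvH, if_pos rfl]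
        have := (pvMain t).2 1 (0 + 1) (by omega)
        norm_num at this ⊢
        exact this
      · by_cases haI : a = 'I'
        · subst haI
          simp only [reduceIte, pvH]
          rw [if_neg (show ¬ (('I' : Char) = 'D') by decide)]
          rw [if_neg (show ¬ ((none : Option Char) = some 'D') by decide)]
          rw [if_pos (show (some 'I' : Option Char) = none ∨ (True ∧ True) from
              Or.inr ⟨trivial, trivial⟩)]
          rw [(pvMain t).1 1 (1 + 1) 'I' (by decide) (by omega)]
          rw [show ((1 : Int) + 1 - 1).toNat = 1 by decide, pvFwd_one]
          rw [show (1 : Int) + (1 + 1) - 1 = 1 + 1 by norm_num]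
        · simp only [if_neg haI, pvH, if_neg haD]
          rw [if_neg (show ¬ ((none : Option Char) = some 'D') by decide)]
          rw [if_neg (show ¬ ((some a : Option Char) = none ∨ (True ∧ a = 'I')) by
              simp [haI])]
          rw [(pvMain t).1 1 (0 + 1) a haD (by omega)]
          rw [show ((0 : Int) + 1 - 1).toNat = 0 by decide]
          simp only [pvFwd, List.nil_append]
          rw [show (1 : Int) + (0 + 1) - 1 = 1 by norm_num]
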